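-- pv_equiv track=rewrite | github.com/Julian-Heng/Advent-of-Code-2020 | 20/day20.py | edge_stat
-- ===== SOURCE A (Python) =====
-- def edge_stat(tile):
--     e = {
--         "N": tile[0],
--         "E": [j[-1] for j in tile],
--         "S": tile[-1],
--         "W": [j[0] for j in tile],
--     }
--
--     return {k: [i for i, e in enumerate(v) if e == "#"] for k, v in e.items()}
-- ===== SOURCE B (Python) =====
-- def edge_stat(tile):
--     # One pass over every cell of the grid: a '#' cell contributes to an edge list
--     # exactly when it lies on the corresponding boundary of its row/grid.
--     res = {"N": [], "E": [], "S": [], "W": []}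
--     h = len(tile)
--     for i, row in enumerate(tile):
--         w = len(row)
--         for j, c in enumerate(row):
--             if c == "#":
--                 if i == 0:
--                     res["N"].append(j)
--                 if j == w - 1:
--                     res["E"].append(i)
--                 if i == h - 1:
--                     res["S"].append(j)
--                 if j == 0:
--                     res["W"].append(i)
--     return res
-- ===== Notes on version B (the rewrite author's own statement) =====
-- stated objective: alternative
-- what changed: B never builds A's four edge sequences: it makes a single pass over every cell of the grid and uses boundary tests (first/last row, first/last column of the row) to route each '#' cell into the N/E/S/W index lists, trading edge extraction for a whole-grid traversal (which touches every cell where A only reads the border).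
import Mathlib
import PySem

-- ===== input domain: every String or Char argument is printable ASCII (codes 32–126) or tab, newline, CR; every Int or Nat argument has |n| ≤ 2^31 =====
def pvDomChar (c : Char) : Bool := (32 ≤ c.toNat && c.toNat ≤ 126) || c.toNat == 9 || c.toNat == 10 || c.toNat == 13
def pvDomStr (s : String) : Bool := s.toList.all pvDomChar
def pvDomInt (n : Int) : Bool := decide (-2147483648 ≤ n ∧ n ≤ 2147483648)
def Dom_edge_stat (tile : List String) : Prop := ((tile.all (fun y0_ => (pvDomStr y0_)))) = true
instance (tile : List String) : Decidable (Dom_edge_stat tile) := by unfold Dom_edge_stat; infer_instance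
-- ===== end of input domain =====

-- B replaces A's edge-extraction (build four edge sequences, then rescan each for '#') by a
-- single pass over every cell of the grid, with boundary tests deciding which edge lists a
-- '#' cell feeds (objective: alternative; B touches every cell where A only reads the border).
-- Equality of the return values is proved on Pre_ (non-empty tile, non-empty rows), exactly
-- where the Python A returns without raising.

-- ===== PORT A =====
-- helper: '[i for i, e in enumerate(v) if e == "#"]'
def pvHashIdx (cs : List Char) : List Int :=
  (PySem.List.enumerate cs).filterMap (fun p => if p.2 = '#' then some p.1 else none)

def edge_stat (tile : List String) : List (String × List Int) :=
  -- e = {"N": tile[0], "E": [j[-1] for j in tile], "S": tile[-1], "W": [j[0] for j in tile]}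
  -- (pyGet?, none = IndexError, is excluded by Pre_; .getD pads outside Pre_ only)
  let eN : List Char := ((PySem.List.pyGet? tile 0).getD "").toList
  let eE : List Char := tile.map (fun j => (PySem.Str.pyGet? j (-1)).getD ' ')
  let eS : List Char := ((PySem.List.pyGet? tile (-1)).getD "").toList
  let eW : List Char := tile.map (fun j => (PySem.Str.pyGet? j 0).getD ' ')
  [("N", pvHashIdx eN), ("E", pvHashIdx eE), ("S", pvHashIdx eS), ("W", pvHashIdx eW)]

-- ===== PORT B =====
-- B-side helper: the body of the inner 'for j, c in enumerate(row)' loop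
def pvCellStep (hgt i w : Int) (acc : List Int × List Int × List Int × List Int)
    (q : Int × Char) : List Int × List Int × List Int × List Int :=
  if q.2 = '#' then
    (if i = 0 then acc.1 ++ [q.1] else acc.1,
     if q.1 = w - 1 then acc.2.1 ++ [i] else acc.2.1,
     if i = hgt - 1 then acc.2.2.1 ++ [q.1] else acc.2.2.1,
     if q.1 = 0 then acc.2.2.2 ++ [i] else acc.2.2.2)
  else acc

-- B-side helper: the body of the outer 'for i, row in enumerate(tile)' loop
def pvRowStep (hgt : Int) (acc : List Int × List Int × List Int × List Int)
    (p : Int × String) : List Int × List Int × List Int × List Int :=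
  (PySem.List.enumerate p.2.toList).foldl (pvCellStep hgt p.1 (p.2.toList.length : Int)) acc

def edge_stat_alt (tile : List String) : List (String × List Int) :=
  let r := (PySem.List.enumerate tile).foldl (pvRowStep (tile.length : Int)) ([], [], [], [])
  [("N", r.1), ("E", r.2.1), ("S", r.2.2.1), ("W", r.2.2.2)]

-- ===== PRECONDITION & SPEC =====
-- Pre_ excludes exactly the inputs where Python A raises IndexError: an empty tile
-- (tile[0]) or a tile containing an empty row (j[-1] / j[0]).
def Pre_edge_stat (tile : List String) : Prop := tile ≠ [] ∧ ∀ s ∈ tile, s ≠ ""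
instance (tile : List String) : Decidable (Pre_edge_stat tile) := by unfold Pre_edge_stat; infer_instance
def pvWitness_edge_stat : List String := ["#.#", "..#", "#.."]

def Spec_edge_stat (tile : List String) (out : List (String × List Int)) : Prop := out = edge_stat_alt tile
instance (tile : List String) (out : List (String × List Int)) : Decidable (Spec_edge_stat tile out) := by unfold Spec_edge_stat; infer_instance

-- ===== CLAIM (what is proved, stated in full; the proofs are below) =====
def Claim_equal_edge_stat : Prop := ∀ (tile : List String), Dom_edge_stat tile → Pre_edge_stat tile → Spec_edge_stat tile (edge_stat tile)

-- ===== LEMMAS AND PROOFS =====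

-- flatMap-of-singleton form of A's filterMap comprehension
def pvF (cs : List Char) : List Int :=
  (PySem.List.enumerate cs).flatMap (fun q => if q.2 = '#' then [q.1] else [])

theorem pvF_eq_hashIdx (cs : List Char) : pvF cs = pvHashIdx cs := by
  unfold pvF pvHashIdx
  have h : ∀ (l : List (Int × Char)),
      l.flatMap (fun q => if q.2 = '#' then [q.1] else [])
        = l.filterMap (fun q => if q.2 = '#' then some q.1 else none) := by
    intro l
    induction l with
    | nil => simp
    | cons q l ih =>
      simp only [List.flatMap_cons, List.filterMap_cons]
      by_cases hq : q.2 = '#' <;> simp [hq, ih]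
  exact h _

-- generic "only index 0 contributes": a positive start contributes nothing
theorem pvFirst_pos {α : Type} (g : α → List Int) :
    ∀ (xs : List α) (s : Int), 0 < s →
      (PySem.List.enumerate xs s).flatMap (fun p => if p.1 = 0 then g p.2 else []) = [] := by
  intro xs
  induction xs with
  | nil => intro s _; simp [PySem.List.enumerate_nil]
  | cons x xs ih =>
    intro s hs
    rw [PySem.List.enumerate_cons]
    simp only [List.flatMap_cons]
    rw [if_neg (by omega), ih (s + 1) (by omega)]
    simp

-- pick-first: at start 0 only the head contributes
theorem pvFirst_zero {α : Type} (g : α → List Int) (xs : List α) :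
    (PySem.List.enumerate xs 0).flatMap (fun p => if p.1 = 0 then g p.2 else []) =
      xs.head?.elim [] g := by
  cases xs with
  | nil => simp [PySem.List.enumerate_nil]
  | cons x xs =>
    rw [PySem.List.enumerate_cons]
    simp only [List.flatMap_cons]
    rw [pvFirst_pos g xs (0 + 1) (by omega)]
    simp

-- pick-last: only the last element has index s + len - 1
theorem pvLast {α : Type} (g : α → List Int) :
    ∀ (xs : List α) (s t : Int), t = s + (xs.length : Int) - 1 →
      (PySem.List.enumerate xs s).flatMap (fun p => if p.1 = t then g p.2 else []) =
        xs.getLast?.elim [] g := by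
  intro xs
  induction xs with
  | nil => intro s t _; simp [PySem.List.enumerate_nil]
  | cons x xs ih =>
    intro s t ht
    rw [PySem.List.enumerate_cons]
    simp only [List.flatMap_cons]
    cases xs with
    | nil =>
      simp only [List.length_cons, List.length_nil] at ht
      rw [if_pos (by omega), PySem.List.enumerate_nil]
      simp
    | cons y ys =>
      rw [if_neg (by simp at ht; omega),
        ih (s + 1) t (by simp at ht ⊢; omega)]
      simp

-- the two char-level corollaries in the shape the inner loop produces
theorem pvLastHash (i : Int) (cs : List Char) :
    (PySem.List.enumerate cs).flatMap
        (fun q => if q.1 = (cs.length : Int) - 1 then (if q.2 = '#' then [i] else []) else []) =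
      if PySem.List.pyGet? cs (-1) = some '#' then [i] else [] := by
  have h := pvLast (fun c => if c = '#' then [i] else []) cs 0 ((cs.length : Int) - 1) (by omega)
  refine Eq.trans h ?_
  rw [PySem.List.pyGet?_neg_one]
  cases cs.getLast? with
  | none => simp
  | some c => by_cases hc : c = '#' <;> simp [hc]

theorem pvFirstHash (i : Int) (cs : List Char) :
    (PySem.List.enumerate cs).flatMap
        (fun q => if q.1 = 0 then (if q.2 = '#' then [i] else []) else []) =
      if PySem.List.pyGet? cs 0 = some '#' then [i] else [] := by
  have h := pvFirst_zero (fun c => if c = '#' then [i] else []) cs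
  refine Eq.trans h ?_
  rw [PySem.List.pyGet?_zero, ← List.head?_eq_getElem?]
  cases cs.head? with
  | none => simp
  | some c => by_cases hc : c = '#' <;> simp [hc]

-- the inner (per-row) loop, characterised as four independent contributions
theorem pvCell_loop (hgt i w : Int) (cs : List Char) :
    ∀ (s : Int) (a : List Int × List Int × List Int × List Int),
      (PySem.List.enumerate cs s).foldl (pvCellStep hgt i w) a =
        (a.1 ++ (if i = 0 then (PySem.List.enumerate cs s).flatMap (fun q => if q.2 = '#' then [q.1] else []) else []),
         a.2.1 ++ (PySem.List.enumerate cs s).flatMap (fun q => if q.1 = w - 1 then (if q.2 = '#' then [i] else []) else []),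
         a.2.2.1 ++ (if i = hgt - 1 then (PySem.List.enumerate cs s).flatMap (fun q => if q.2 = '#' then [q.1] else []) else []),
         a.2.2.2 ++ (PySem.List.enumerate cs s).flatMap (fun q => if q.1 = 0 then (if q.2 = '#' then [i] else []) else [])) := by
  induction cs with
  | nil => intro s a; simp [PySem.List.enumerate_nil]
  | cons c cs ih =>
    intro s a
    rw [PySem.List.enumerate_cons]
    simp only [List.foldl_cons, List.flatMap_cons]
    rw [ih]
    simp only [pvCellStep]
    split_ifs <;> simp_all [List.append_assoc]

-- the per-row step in closed form (inner loop at start 0, w = row length)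
theorem pvRowStep_char (hgt : Int) (a : List Int × List Int × List Int × List Int)
    (p : Int × String) :
    pvRowStep hgt a p =
      (a.1 ++ (if p.1 = 0 then pvF p.2.toList else []),
       a.2.1 ++ (if PySem.List.pyGet? p.2.toList (-1) = some '#' then [p.1] else []),
       a.2.2.1 ++ (if p.1 = hgt - 1 then pvF p.2.toList else []),
       a.2.2.2 ++ (if PySem.List.pyGet? p.2.toList 0 = some '#' then [p.1] else [])) := by
  unfold pvRowStep
  rw [pvCell_loop]
  simp only [Prod.mk.injEq]
  exact ⟨rfl, congrArg (a.2.1 ++ ·) (pvLastHash p.1 p.2.toList), rfl,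
    congrArg (a.2.2.2 ++ ·) (pvFirstHash p.1 p.2.toList)⟩

-- the outer loop, characterised as four independent contributions
theorem pvRow_loop (hgt : Int) (rows : List String) :
    ∀ (s : Int) (a : List Int × List Int × List Int × List Int),
      (PySem.List.enumerate rows s).foldl (pvRowStep hgt) a =
        (a.1 ++ (PySem.List.enumerate rows s).flatMap (fun p => if p.1 = 0 then pvF p.2.toList else []),
         a.2.1 ++ (PySem.List.enumerate rows s).flatMap (fun p => if PySem.List.pyGet? p.2.toList (-1) = some '#' then [p.1] else []),
         a.2.2.1 ++ (PySem.List.enumerate rows s).flatMap (fun p => if p.1 = hgt - 1 then pvF p.2.toList else []),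
         a.2.2.2 ++ (PySem.List.enumerate rows s).flatMap (fun p => if PySem.List.pyGet? p.2.toList 0 = some '#' then [p.1] else [])) := by
  induction rows with
  | nil => intro s a; simp [PySem.List.enumerate_nil]
  | cons r rows ih =>
    intro s a
    rw [PySem.List.enumerate_cons]
    simp only [List.foldl_cons, List.flatMap_cons]
    rw [pvRowStep_char, ih]
    simp [List.append_assoc]

-- an Option Char padded with ' ' equals '#' iff it is 'some #'
theorem pv_getD_hash_iff (o : Option Char) : o.getD ' ' = '#' ↔ o = some '#' := by
  cases o <;> simp

-- A's per-edge comprehension over a mapped edge list, rephrased over the rows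
theorem pvHashIdx_map_gen (f : String → Option Char) (tile : List String) :
    ∀ (s : Int),
      (PySem.List.enumerate (tile.map (fun j => (f j).getD ' ')) s).filterMap
          (fun p => if p.2 = '#' then some p.1 else none)
        = (PySem.List.enumerate tile s).flatMap
            (fun p => if f p.2 = some '#' then [p.1] else []) := by
  induction tile with
  | nil => intro s; simp [PySem.List.enumerate_nil]
  | cons hd tl ih =>
    intro s
    simp only [List.map_cons, PySem.List.enumerate_cons, List.filterMap_cons, List.flatMap_cons]
    rw [ih]
    by_cases h : f hd = some '#' <;> simp [h, pv_getD_hash_iff]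

theorem pvHashIdx_map (f : String → Option Char) (tile : List String) :
    pvHashIdx (tile.map (fun j => (f j).getD ' '))
      = (PySem.List.enumerate tile).flatMap
          (fun p => if f p.2 = some '#' then [p.1] else []) :=
  pvHashIdx_map_gen f tile 0

-- A's N component equals B's pick-first contribution
theorem pvN_closed (tile : List String) :
    (PySem.List.enumerate tile).flatMap (fun p => if p.1 = 0 then pvF p.2.toList else []) =
      pvHashIdx ((PySem.List.pyGet? tile 0).getD "").toList := by
  have h := pvFirst_zero (fun r : String => pvF r.toList) tile
  refine Eq.trans h ?_
  cases tile with
  | nil => simp [pvHashIdx, PySem.List.pyGet?, PySem.List.pyIdx?]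
  | cons r rows => simp [pvF_eq_hashIdx]

-- A's S component equals B's pick-last contribution
theorem pvS_closed (tile : List String) :
    (PySem.List.enumerate tile).flatMap
        (fun p => if p.1 = (tile.length : Int) - 1 then pvF p.2.toList else []) =
      pvHashIdx ((PySem.List.pyGet? tile (-1)).getD "").toList := by
  have h := pvLast (fun r : String => pvF r.toList) tile 0 ((tile.length : Int) - 1) (by omega)
  refine Eq.trans h ?_
  rw [PySem.List.pyGet?_neg_one]
  cases hL : tile.getLast? with
  | none => simp [pvHashIdx, PySem.List.enumerate_nil]
  | some r => simp [pvF_eq_hashIdx]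

-- ===== VERDICT (by name: the statement is the Claim_ definition above) =====
theorem edge_stat_spec : Claim_equal_edge_stat := by
  intro tile _ _
  show edge_stat tile = edge_stat_alt tile
  simp only [edge_stat, edge_stat_alt]
  rw [pvRow_loop]
  simp only [List.nil_append]
  rw [pvN_closed, pvS_closed,
    pvHashIdx_map (fun j => PySem.Str.pyGet? j (-1)) tile,
    pvHashIdx_map (fun j => PySem.Str.pyGet? j 0) tile]
  simp [PySem.Str.pyGet?]
  exact ⟨rfl, rfl⟩
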